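-- pv_equiv track=rewrite | github.com/class1c-j/FEUP-FPRO | Play/Py12 Problem solving/Four_in_a_line.py | four_in_line
-- ===== SOURCE A (Python) =====
-- def four_in_line(board):
--     win = set()
--
--     # check horizontal
--     for c in range(len(board[0])-3):
--         for r in range(len(board)):
--             if board[r][c] == board[r][c+1] == board[r][c+2] == board[r][c+3] != 0:
--                 win.add((r, c))
--                 win.add((r, c+3))
--
--     # check vertical
--     for c in range(len(board[0])):
--         for r in range(len(board)-3):
--             if board[r][c] == board[r+1][c] == board[r+2][c] == board[r+3][c] != 0:
--                 win.add((r, c))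
--                 win.add((r+3, c))
--
--     # check pos diag
--     for c in range(len(board[0])-3):
--         for r in range(len(board)-3):
--             if board[r][c] == board[r+1][c+1] == board[r+2][c+2] == board[r+3][c+3] != 0:
--                 win.add((r, c))
--                 win.add((r+3, c+3))
--
--     # check neg diag
--     for c in range(len(board[0])-3):
--         for r in range(3, len(board)):
--             if board[r][c] == board[r-1][c+1] == board[r-2][c+2] == board[r-3][c+3] != 0:
--                 win.add((r, c))
--                 win.add((r-3, c+3))
--
--
--
--     return win
-- ===== SOURCE B (Python) =====
-- def four_in_line(board):
--     R, C = len(board), len(board[0])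
--     win = set()
--     add = win.add
--     for dr, dc in ((0, 1), (1, 0), (1, 1), (-1, 1)):
--         run = {}
--         get = run.get
--         for c in range(C):
--             for r in range(R):
--                 v = board[r][c]
--                 if v == 0:
--                     continue
--                 pr = r - dr
--                 pc = c - dc
--                 if 0 <= pr < R and 0 <= pc < C and board[pr][pc] == v:
--                     k = get((pr, pc), 0) + 1
--                 else:
--                     k = 1
--                 run[(r, c)] = k
--                 if k >= 4:
--                     add((r - 3 * dr, c - 3 * dc))
--                     add((r, c))
--     return win
-- ===== Notes on version B (the rewrite author's own statement) =====
-- stated objective: alternative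
-- what changed: A enumerates every 4-cell window per direction and compares its four cells; B instead runs a run-length dynamic programme: one column-major sweep per direction keeps, in a dict, the length of the streak of equal nonzero cells ending at each cell, and marks a window's two end cells whenever a streak reaches length 4.
-- outside the precondition, e.g. on four_in_line([[0, 0], [0]]): A returns set(), B raises IndexError
import Mathlib
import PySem

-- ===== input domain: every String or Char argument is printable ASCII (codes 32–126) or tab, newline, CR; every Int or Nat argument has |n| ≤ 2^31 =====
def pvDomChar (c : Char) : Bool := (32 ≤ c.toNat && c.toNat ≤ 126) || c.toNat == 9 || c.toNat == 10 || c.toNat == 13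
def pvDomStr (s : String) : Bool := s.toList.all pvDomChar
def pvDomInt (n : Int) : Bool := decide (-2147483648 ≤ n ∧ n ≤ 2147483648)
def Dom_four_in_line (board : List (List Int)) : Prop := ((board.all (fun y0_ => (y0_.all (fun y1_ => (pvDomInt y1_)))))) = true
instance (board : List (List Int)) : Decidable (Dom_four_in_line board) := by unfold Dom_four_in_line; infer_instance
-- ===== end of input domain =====

-- B replaces A's four window-enumerating double-loops by a run-length dynamic programme (a dict of
-- streak lengths per direction, marking a window's two ends whenever a streak reaches 4); same cost,
-- objective: alternative. Pre_ excludes boards A may raise IndexError on (empty, or a row shorter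
-- than the first row).


-- board[r][c]; total form of the Python indexing, exact under Pre_ (all indices generated in range)
def pvAt (board : List (List Int)) (r c : Int) : Int :=
  PySem.List.pyGetD (PySem.List.pyGetD board r []) c 0

-- ===== PORT A =====
def four_in_line (board : List (List Int)) : List (Int × Int) :=
  let win : PySem.Set (Int × Int) := PySem.Set.empty
  -- check horizontal
  let win := (PySem.List.pyRange 0 (((PySem.List.pyGetD board 0 []).length : Int) - 3) 1).foldl (fun win c =>
    (PySem.List.pyRange 0 (board.length : Int) 1).foldl (fun win r =>
      if pvAt board r c = pvAt board r (c+1) ∧ pvAt board r (c+1) = pvAt board r (c+2) ∧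
         pvAt board r (c+2) = pvAt board r (c+3) ∧ pvAt board r (c+3) ≠ 0 then
        PySem.Set.add (PySem.Set.add win (r, c)) (r, c+3)
      else win) win) win
  -- check vertical
  let win := (PySem.List.pyRange 0 ((PySem.List.pyGetD board 0 []).length : Int) 1).foldl (fun win c =>
    (PySem.List.pyRange 0 ((board.length : Int) - 3) 1).foldl (fun win r =>
      if pvAt board r c = pvAt board (r+1) c ∧ pvAt board (r+1) c = pvAt board (r+2) c ∧
         pvAt board (r+2) c = pvAt board (r+3) c ∧ pvAt board (r+3) c ≠ 0 then
        PySem.Set.add (PySem.Set.add win (r, c)) (r+3, c)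
      else win) win) win
  -- check pos diag
  let win := (PySem.List.pyRange 0 (((PySem.List.pyGetD board 0 []).length : Int) - 3) 1).foldl (fun win c =>
    (PySem.List.pyRange 0 ((board.length : Int) - 3) 1).foldl (fun win r =>
      if pvAt board r c = pvAt board (r+1) (c+1) ∧ pvAt board (r+1) (c+1) = pvAt board (r+2) (c+2) ∧
         pvAt board (r+2) (c+2) = pvAt board (r+3) (c+3) ∧ pvAt board (r+3) (c+3) ≠ 0 then
        PySem.Set.add (PySem.Set.add win (r, c)) (r+3, c+3)
      else win) win) win
  -- check neg diag
  let win := (PySem.List.pyRange 0 (((PySem.List.pyGetD board 0 []).length : Int) - 3) 1).foldl (fun win c =>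
    (PySem.List.pyRange 3 (board.length : Int) 1).foldl (fun win r =>
      if pvAt board r c = pvAt board (r-1) (c+1) ∧ pvAt board (r-1) (c+1) = pvAt board (r-2) (c+2) ∧
         pvAt board (r-2) (c+2) = pvAt board (r-3) (c+3) ∧ pvAt board (r-3) (c+3) ≠ 0 then
        PySem.Set.add (PySem.Set.add win (r, c)) (r-3, c+3)
      else win) win) win
  win

-- ===== PORT B =====
-- run-length DP: `run` maps a cell to the length of the streak of equal nonzero cells ending there
-- in direction (dr, dc); a streak of length >= 4 marks the window's two end cells.
-- one cell of B's sweep: v = board[r][c]; if nonzero, extend the streak ending at the previous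
-- cell in direction (dr, dc) (dict lookup), record it, and mark the window ends when it reaches 4.
def pvBody (board : List (List Int)) (R C dr dc : Int)
    (st : PySem.Dict (Int × Int) Int × PySem.Set (Int × Int)) (c r : Int) :
    PySem.Dict (Int × Int) Int × PySem.Set (Int × Int) :=
  let v := pvAt board r c
  if v = 0 then st else
  let pr := r - dr
  let pc := c - dc
  let k : Int :=
    if 0 ≤ pr ∧ pr < R ∧ 0 ≤ pc ∧ pc < C ∧ pvAt board pr pc = v
    then PySem.Dict.getD st.1 (pr, pc) 0 + 1
    else 1
  (PySem.Dict.insert st.1 (r, c) k,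
   if 4 ≤ k then PySem.Set.add (PySem.Set.add st.2 (r - 3 * dr, c - 3 * dc)) (r, c) else st.2)

def four_in_line_alt (board : List (List Int)) : List (Int × Int) :=
  let R : Int := (board.length : Int)
  let C : Int := ((PySem.List.pyGetD board 0 []).length : Int)
  ([((0 : Int), (1 : Int)), (1, 0), (1, 1), (-1, 1)]).foldl (fun win d =>
    ((PySem.List.pyRange 0 C 1).foldl (fun st c =>
      (PySem.List.pyRange 0 R 1).foldl (fun st r => pvBody board R C d.1 d.2 st c r) st)
      (PySem.Dict.empty, win)).2) PySem.Set.empty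

-- ===== PRECONDITION & SPEC =====
-- Pre_ excludes the empty board and boards with a row shorter than the first row, on which
-- the Python A may raise IndexError (on some such shapes A still returns — see claim.json cites).
def Pre_four_in_line (board : List (List Int)) : Prop :=
  board ≠ [] ∧ ∀ row ∈ board, (board.headD []).length ≤ row.length
instance (board : List (List Int)) : Decidable (Pre_four_in_line board) := by
  unfold Pre_four_in_line; infer_instance
def pvWitness_four_in_line : List (List Int) :=
  [[1, 1, 1, 1], [0, 2, 0, 2], [2, 0, 1, 0], [0, 0, 2, 1]]
def Spec_four_in_line (board : List (List Int)) (out : List (Int × Int)) : Prop := out = four_in_line_alt board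
instance (board : List (List Int)) (out : List (Int × Int)) : Decidable (Spec_four_in_line board out) := by unfold Spec_four_in_line; infer_instance

-- ===== CLAIM (what is proved, stated in full; the proofs are below) =====
def Claim_equal_four_in_line : Prop := ∀ (board : List (List Int)), Dom_four_in_line board → Pre_four_in_line board → Spec_four_in_line board (four_in_line board)

-- ===== LEMMAS AND PROOFS =====

-- `pvS at_ R C dr dc m r c` : a streak of at least m equal nonzero in-bounds cells ends at (r, c)
-- (stepping backwards by (dr, dc)).
def pvInb (R C r c : Int) : Bool := decide (0 ≤ r) && decide (r < R) && decide (0 ≤ c) && decide (c < C)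

def pvS (at_ : Int → Int → Int) (R C dr dc : Int) : Nat → Int → Int → Bool
  | 0, _, _ => true
  | (m+1), r, c =>
      pvInb R C r c && (at_ r c != 0) &&
        (decide (m = 0) ||
          (pvInb R C (r - dr) (c - dc) && (at_ (r - dr) (c - dc) == at_ r c) &&
            pvS at_ R C dr dc m (r - dr) (c - dc)))

-- dict invariant: every already-processed nonzero in-bounds cell stores its streak length
def pvGood (board : List (List Int)) (R C dr dc : Int)
    (run : PySem.Dict (Int × Int) Int) (c₀ r₀ : Int) : Prop :=
  ∀ r c : Int, 0 ≤ r → r < R → 0 ≤ c → c < C → (c < c₀ ∨ (c = c₀ ∧ r < r₀)) →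
    pvAt board r c ≠ 0 →
    ∀ m : Nat, ((m : Int) ≤ run.getD (r, c) 0 ↔ pvS (pvAt board) R C dr dc m r c = true)

-- the pure (dict-free) form of B's sweep
def pvPure (board : List (List Int)) (R C dr dc : Int) (win : PySem.Set (Int × Int)) :
    PySem.Set (Int × Int) :=
  (PySem.List.pyRange 0 C 1).foldl (fun w c =>
    (PySem.List.pyRange 0 R 1).foldl (fun w r =>
      if pvS (pvAt board) R C dr dc 4 r c then
        PySem.Set.add (PySem.Set.add w (r - 3 * dr, c - 3 * dc)) (r, c)
      else w) w) win

theorem pvFoldl_congr2 {α β : Type} {l : List β} {f g : α → β → α} {a b : α}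
    (h : ∀ x y, f x y = g x y) (hab : a = b) : l.foldl f a = l.foldl g b := by
  subst hab
  induction l generalizing a with
  | nil => rfl
  | cons x t ih => simp only [List.foldl_cons, h, ih]

-- one row step preserves pvGood and fires exactly on pvS 4
theorem pvStep_good (board : List (List Int)) (R C dr dc : Int)
    (Hord : dc = 1 ∨ (dc = 0 ∧ dr = 1))
    (c₀ r₀ : Int) (hc0 : 0 ≤ c₀) (hc1 : c₀ < C) (hr0 : 0 ≤ r₀) (hr1 : r₀ < R)
    (run : PySem.Dict (Int × Int) Int) (win : PySem.Set (Int × Int))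
    (hg : pvGood board R C dr dc run c₀ r₀) :
    (pvBody board R C dr dc (run, win) c₀ r₀).2 =
      (if pvS (pvAt board) R C dr dc 4 r₀ c₀ then
        PySem.Set.add (PySem.Set.add win (r₀ - 3 * dr, c₀ - 3 * dc)) (r₀, c₀)
      else win) ∧
    pvGood board R C dr dc (pvBody board R C dr dc (run, win) c₀ r₀).1 c₀ (r₀ + 1) := by
  by_cases hv : pvAt board r₀ c₀ = 0
  · have hS : pvS (pvAt board) R C dr dc 4 r₀ c₀ = false := by
      simp [pvS, hv]
    constructor
    · simp [pvBody, hv, hS]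
    · simp only [pvBody, hv, if_pos]
      intro r c h1 h2 h3 h4 h5 h6 m
      refine hg r c h1 h2 h3 h4 ?_ h6 m
      by_cases hrc : r = r₀ ∧ c = c₀
      · exact absurd (by rw [hrc.1, hrc.2]; exact hv) h6
      · rcases h5 with h5 | h5
        · exact Or.inl h5
        · exact Or.inr ⟨h5.1, by omega⟩
  · -- nonzero cell: compute the streak length k and characterise it
    have hib0 : pvInb R C r₀ c₀ = true := by
      simp only [pvInb, Bool.and_eq_true, decide_eq_true_eq]
      exact ⟨⟨⟨hr0, hr1⟩, hc0⟩, hc1⟩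
    have hnz0 : (pvAt board r₀ c₀ != 0) = true := by
      simp [bne_iff_ne, hv]
    have hk : ∀ m : Nat, ((m : Int) ≤
        (if 0 ≤ r₀ - dr ∧ r₀ - dr < R ∧ 0 ≤ c₀ - dc ∧ c₀ - dc < C ∧
            pvAt board (r₀ - dr) (c₀ - dc) = pvAt board r₀ c₀
         then PySem.Dict.getD run (r₀ - dr, c₀ - dc) 0 + 1 else 1) ↔
        pvS (pvAt board) R C dr dc m r₀ c₀ = true) := by
      intro m
      by_cases hprev : 0 ≤ r₀ - dr ∧ r₀ - dr < R ∧ 0 ≤ c₀ - dc ∧ c₀ - dc < C ∧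
          pvAt board (r₀ - dr) (c₀ - dc) = pvAt board r₀ c₀
      · rw [if_pos hprev]
        have hproc : c₀ - dc < c₀ ∨ (c₀ - dc = c₀ ∧ r₀ - dr < r₀) := by
          rcases Hord with h | h <;> omega
        have hnz : pvAt board (r₀ - dr) (c₀ - dc) ≠ 0 := by
          rw [hprev.2.2.2.2]; exact hv
        have hib1 : pvInb R C (r₀ - dr) (c₀ - dc) = true := by
          simp only [pvInb, Bool.and_eq_true, decide_eq_true_eq]
          exact ⟨⟨⟨hprev.1, hprev.2.1⟩, hprev.2.2.1⟩, hprev.2.2.2.1⟩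
        have heq : (pvAt board (r₀ - dr) (c₀ - dc) == pvAt board r₀ c₀) = true := by
          simp [hprev.2.2.2.2]
        have hgp := hg (r₀ - dr) (c₀ - dc) hprev.1 hprev.2.1 hprev.2.2.1 hprev.2.2.2.1 hproc hnz
        have h0 := (hgp 0).mpr rfl
        simp only [Nat.cast_zero] at h0
        cases m with
        | zero =>
          refine ⟨fun _ => rfl, fun _ => by push_cast; omega⟩
        | succ m =>
          have hrhs : pvS (pvAt board) R C dr dc (m + 1) r₀ c₀ =
              (decide (m = 0) || pvS (pvAt board) R C dr dc m (r₀ - dr) (c₀ - dc)) := by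
            simp [pvS, hib0, hnz0, hib1, heq]
          rw [hrhs]
          cases m with
          | zero =>
            refine ⟨fun _ => by simp, fun _ => by push_cast; omega⟩
          | succ m' =>
            have hm := hgp (m' + 1)
            have hd : (decide (m' + 1 = 0) ||
                pvS (pvAt board) R C dr dc (m' + 1) (r₀ - dr) (c₀ - dc)) =
                pvS (pvAt board) R C dr dc (m' + 1) (r₀ - dr) (c₀ - dc) := by
              simp
            rw [hd, ← hm]
            push_cast
            omega
      · rw [if_neg hprev]
        cases m with
        | zero =>
          refine ⟨fun _ => by simp [pvS], fun _ => by norm_num⟩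
        | succ m =>
          have hfail : (pvInb R C (r₀ - dr) (c₀ - dc) &&
              (pvAt board (r₀ - dr) (c₀ - dc) == pvAt board r₀ c₀) &&
              pvS (pvAt board) R C dr dc m (r₀ - dr) (c₀ - dc)) = false := by
            by_contra hne
            have h := eq_true_of_ne_false hne
            simp only [pvInb, Bool.and_eq_true, decide_eq_true_eq, beq_iff_eq] at h
            exact hprev (by tauto)
          have hrhs : pvS (pvAt board) R C dr dc (m + 1) r₀ c₀ = decide (m = 0) := by
            simp [pvS, hib0, hnz0, hfail]
          rw [hrhs]
          cases m with
          | zero =>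
            refine ⟨fun _ => by simp, fun _ => by norm_num⟩
          | succ m' =>
            have hd : decide (m' + 1 = 0) = false := by simp
            rw [hd]
            simp only [Bool.false_eq_true, iff_false]
            push_cast
            omega
    have hbody : pvBody board R C dr dc (run, win) c₀ r₀ =
        (PySem.Dict.insert run (r₀, c₀)
          (if 0 ≤ r₀ - dr ∧ r₀ - dr < R ∧ 0 ≤ c₀ - dc ∧ c₀ - dc < C ∧
              pvAt board (r₀ - dr) (c₀ - dc) = pvAt board r₀ c₀
           then PySem.Dict.getD run (r₀ - dr, c₀ - dc) 0 + 1 else 1),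
         if 4 ≤ (if 0 ≤ r₀ - dr ∧ r₀ - dr < R ∧ 0 ≤ c₀ - dc ∧ c₀ - dc < C ∧
              pvAt board (r₀ - dr) (c₀ - dc) = pvAt board r₀ c₀
           then PySem.Dict.getD run (r₀ - dr, c₀ - dc) 0 + 1 else 1)
         then PySem.Set.add (PySem.Set.add win (r₀ - 3 * dr, c₀ - 3 * dc)) (r₀, c₀) else win) := by
      simp [pvBody, hv]
    rw [hbody]
    constructor
    · have h4 := hk 4
      simp only [Nat.cast_ofNat] at h4
      exact if_congr h4 rfl rfl
    · intro r c h1 h2 h3 h4 h5 h6 m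
      by_cases hrc : r = r₀ ∧ c = c₀
      · rw [hrc.1, hrc.2]
        rw [PySem.Dict.getD_insert]
        rw [if_pos rfl]
        exact hk m
      · have hne : ((r, c) : Int × Int) ≠ (r₀, c₀) := by
          intro hcontra
          exact hrc ⟨congrArg Prod.fst hcontra, congrArg Prod.snd hcontra⟩
        rw [PySem.Dict.getD_insert, if_neg hne]
        refine hg r c h1 h2 h3 h4 ?_ h6 m
        rcases h5 with h5 | h5
        · exact Or.inl h5
        · exact Or.inr ⟨h5.1, by omega⟩

-- inner induction: sweep of one column
theorem pvRows (board : List (List Int)) (R C dr dc : Int)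
    (Hord : dc = 1 ∨ (dc = 0 ∧ dr = 1))
    (c₀ : Int) (hc0 : 0 ≤ c₀) (hc1 : c₀ < C) :
    ∀ (n : Nat) (r₀ : Int), 0 ≤ r₀ → (R - r₀).toNat = n →
    ∀ (run : PySem.Dict (Int × Int) Int) (win : PySem.Set (Int × Int)),
      pvGood board R C dr dc run c₀ r₀ →
      ((PySem.List.pyRange r₀ R 1).foldl (fun st r => pvBody board R C dr dc st c₀ r) (run, win)).2 =
        (PySem.List.pyRange r₀ R 1).foldl (fun w r =>
          if pvS (pvAt board) R C dr dc 4 r c₀ then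
            PySem.Set.add (PySem.Set.add w (r - 3 * dr, c₀ - 3 * dc)) (r, c₀)
          else w) win ∧
      pvGood board R C dr dc
        ((PySem.List.pyRange r₀ R 1).foldl (fun st r => pvBody board R C dr dc st c₀ r) (run, win)).1
        c₀ R := by
  intro n
  induction n with
  | zero =>
    intro r₀ hr0 hn run win hg
    have hRr : R ≤ r₀ := by omega
    rw [PySem.List.pyRange_one_eq_nil hRr]
    simp only [List.foldl_nil]
    refine ⟨by trivial, ?_⟩
    intro r c h1 h2 h3 h4 h5 h6 m
    refine hg r c h1 h2 h3 h4 ?_ h6 m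
    rcases h5 with h5 | h5
    · exact Or.inl h5
    · exact Or.inr ⟨h5.1, by omega⟩
  | succ n ih =>
    intro r₀ hr0 hn run win hg
    have hrR : r₀ < R := by omega
    rw [PySem.List.pyRange_one_cons hrR]
    simp only [List.foldl_cons]
    obtain ⟨hwin, hgood⟩ := pvStep_good board R C dr dc Hord c₀ r₀ hc0 hc1 hr0 hrR run win hg
    have hst : pvBody board R C dr dc (run, win) c₀ r₀ =
        ((pvBody board R C dr dc (run, win) c₀ r₀).1,
         (pvBody board R C dr dc (run, win) c₀ r₀).2) := rfl
    rw [hst, hwin]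
    exact ih (r₀ + 1) (by omega) (by omega) _ _ hgood

-- outer induction: the whole sweep, dict eliminated
theorem pvPass_eq_pure (board : List (List Int)) (R C dr dc : Int)
    (Hord : dc = 1 ∨ (dc = 0 ∧ dr = 1))
    (win : PySem.Set (Int × Int)) :
    ((PySem.List.pyRange 0 C 1).foldl (fun st c =>
      (PySem.List.pyRange 0 R 1).foldl (fun st r => pvBody board R C dr dc st c r) st)
      (PySem.Dict.empty, win)).2 = pvPure board R C dr dc win := by
  have aux : ∀ (n : Nat) (c₀ : Int), 0 ≤ c₀ → (C - c₀).toNat = n →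
      ∀ (run : PySem.Dict (Int × Int) Int) (win : PySem.Set (Int × Int)),
      pvGood board R C dr dc run c₀ 0 →
      ((PySem.List.pyRange c₀ C 1).foldl (fun st c =>
        (PySem.List.pyRange 0 R 1).foldl (fun st r => pvBody board R C dr dc st c r) st)
        (run, win)).2 =
      (PySem.List.pyRange c₀ C 1).foldl (fun w c =>
        (PySem.List.pyRange 0 R 1).foldl (fun w r =>
          if pvS (pvAt board) R C dr dc 4 r c then
            PySem.Set.add (PySem.Set.add w (r - 3 * dr, c - 3 * dc)) (r, c)
          else w) w) win := by
    intro n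
    induction n with
    | zero =>
      intro c₀ hc0 hn run win _
      have hCc : C ≤ c₀ := by omega
      rw [PySem.List.pyRange_one_eq_nil hCc]
      simp only [List.foldl_nil]
    | succ n ih =>
      intro c₀ hc0 hn run win hg
      have hcC : c₀ < C := by omega
      rw [PySem.List.pyRange_one_cons hcC]
      simp only [List.foldl_cons]
      obtain ⟨hwin, hgood⟩ := pvRows board R C dr dc Hord c₀ hc0 hcC (R - 0).toNat 0 le_rfl rfl
        run win hg
      have hst : ((PySem.List.pyRange 0 R 1).foldl
            (fun st r => pvBody board R C dr dc st c₀ r) (run, win)) =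
          (((PySem.List.pyRange 0 R 1).foldl
            (fun st r => pvBody board R C dr dc st c₀ r) (run, win)).1,
           ((PySem.List.pyRange 0 R 1).foldl
            (fun st r => pvBody board R C dr dc st c₀ r) (run, win)).2) := rfl
      rw [hst, hwin]
      refine ih (c₀ + 1) (by omega) (by omega) _ _ ?_
      intro r c h1 h2 h3 h4 h5 h6 m
      refine hgood r c h1 h2 h3 h4 ?_ h6 m
      rcases h5 with h5 | h5
      · rcases (by omega : c < c₀ ∨ c = c₀) with h | h
        · exact Or.inl h
        · exact Or.inr ⟨h, h2⟩
      · exact absurd h5.2 (by omega)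
  have hgood0 : pvGood board R C dr dc PySem.Dict.empty 0 0 := by
    intro r c h1 h2 h3 h4 h5 h6 m
    rcases h5 with h5 | h5
    · exact absurd h5 (by omega)
    · exact absurd h5.2 (by omega)
  exact aux (C - 0).toNat 0 le_rfl rfl PySem.Dict.empty win hgood0

-- nested if-add-add loops are a fold of Set.add over an emission list
theorem pvFoldl_flatMap {α β γ : Type} (l : List α) (g : α → List β) (f : γ → β → γ) (i : γ) :
    (l.flatMap g).foldl f i = l.foldl (fun acc x => (g x).foldl f acc) i := by
  induction l generalizing i with
  | nil => rfl
  | cons x t ih => simp only [List.flatMap_cons, List.foldl_append, List.foldl_cons, ih]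

theorem pvNested_emit {γ : Type} [BEq γ] (lc lr : List Int) (P : Int → Int → Bool)
    (a b : Int → Int → γ) (w : PySem.Set γ) :
    lc.foldl (fun w c => lr.foldl (fun w r =>
        if P r c then PySem.Set.add (PySem.Set.add w (a r c)) (b r c) else w) w) w =
      (lc.flatMap (fun c => lr.flatMap (fun r =>
        if P r c then [a r c, b r c] else []))).foldl PySem.Set.add w := by
  rw [pvFoldl_flatMap]
  refine pvFoldl_congr2 (fun w c => ?_) rfl
  rw [pvFoldl_flatMap]
  refine pvFoldl_congr2 (fun w r => ?_) rfl
  by_cases h : P r c <;> simp [h, List.foldl_cons]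

theorem pvFlatMap_congr_mem {α γ : Type} {l : List α} {f g : α → List γ}
    (h : ∀ x ∈ l, f x = g x) : l.flatMap f = l.flatMap g := by
  induction l with
  | nil => rfl
  | cons x t ih =>
    simp only [List.flatMap_cons, h x (by simp), ih fun y hy => h y (by simp [hy])]

theorem pvFlatMap_trim_left {γ : Type} (g : Int → List γ) (a m b : Int) (h1 : a ≤ m)
    (hnil : ∀ x, a ≤ x → x < m → g x = []) :
    (PySem.List.pyRange a b 1).flatMap g = (PySem.List.pyRange m b 1).flatMap g := by
  rcases (by omega : m ≤ b ∨ b < m) with h2 | h2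
  · rw [PySem.List.pyRange_one_append a m b h1 h2, List.flatMap_append]
    have : (PySem.List.pyRange a m 1).flatMap g = [] := by
      rw [List.flatMap_eq_nil_iff]
      intro x hx
      rw [PySem.List.mem_pyRange_one] at hx
      exact hnil x hx.1 hx.2
    simp [this]
  · rw [PySem.List.pyRange_one_eq_nil (le_of_lt h2)]
    simp only [List.flatMap_nil]
    rw [List.flatMap_eq_nil_iff]
    intro x hx
    rw [PySem.List.mem_pyRange_one] at hx
    exact hnil x hx.1 (lt_of_lt_of_le hx.2 (le_of_lt h2))
    

theorem pvFlatMap_trim_right {γ : Type} (g : Int → List γ) (a m b : Int) (h2 : m ≤ b)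
    (hnil : ∀ x, m ≤ x → x < b → g x = []) :
    (PySem.List.pyRange a b 1).flatMap g = (PySem.List.pyRange a m 1).flatMap g := by
  rcases (by omega : a ≤ m ∨ m < a) with h1 | h1
  · rw [PySem.List.pyRange_one_append a m b h1 h2, List.flatMap_append]
    have : (PySem.List.pyRange m b 1).flatMap g = [] := by
      rw [List.flatMap_eq_nil_iff]
      intro x hx
      rw [PySem.List.mem_pyRange_one] at hx
      exact hnil x hx.1 hx.2
    simp [this]
  · rw [PySem.List.pyRange_one_eq_nil (le_of_lt h1)]
    simp only [List.flatMap_nil]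
    rw [List.flatMap_eq_nil_iff]
    intro x hx
    rw [PySem.List.mem_pyRange_one] at hx
    exact hnil x (by omega) hx.2

theorem pvFlatMap_shift {γ : Type} (g : Int → List γ) (a b k : Int) :
    (PySem.List.pyRange a b 1).flatMap g =
      (PySem.List.pyRange (a + k) (b + k) 1).flatMap (fun x => g (x - k)) := by
  rw [PySem.List.pyRange_one, PySem.List.pyRange_one]
  have hlen : (b + k - (a + k)).toNat = (b - a).toNat := by omega
  rw [hlen, List.flatMap_map, List.flatMap_map]
  refine pvFlatMap_congr_mem fun x _ => ?_
  show g (a + x) = g (a + k + x - k)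
  congr 1
  omega

theorem pvS4_iff (at_ : Int → Int → Int) (R C dr dc r c : Int) :
    pvS at_ R C dr dc 4 r c = true ↔
      ((0 ≤ r ∧ r < R ∧ 0 ≤ c ∧ c < C) ∧ at_ r c ≠ 0 ∧
       (0 ≤ r - dr ∧ r - dr < R ∧ 0 ≤ c - dc ∧ c - dc < C) ∧ at_ (r - dr) (c - dc) = at_ r c ∧
       (0 ≤ r - dr - dr ∧ r - dr - dr < R ∧ 0 ≤ c - dc - dc ∧ c - dc - dc < C) ∧
         at_ (r - dr - dr) (c - dc - dc) = at_ (r - dr) (c - dc) ∧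
       (0 ≤ r - dr - dr - dr ∧ r - dr - dr - dr < R ∧ 0 ≤ c - dc - dc - dc ∧ c - dc - dc - dc < C) ∧
         at_ (r - dr - dr - dr) (c - dc - dc - dc) = at_ (r - dr - dr) (c - dc - dc)) := by
  show (pvS at_ R C dr dc (3+1) r c = true) ↔ _
  rw [pvS]
  show ((_ && (decide (3 = 0) || (_ && _ && pvS at_ R C dr dc (2+1) _ _))) = true) ↔ _
  rw [pvS]
  show ((_ && (_ || (_ && _ && (_ && (decide (2 = 0) || (_ && _ && pvS at_ R C dr dc (1+1) _ _)))))) = true) ↔ _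
  rw [pvS]
  show ((_ && (_ || (_ && _ && (_ && (_ || (_ && _ && (_ && (decide (1 = 0) || (_ && _ && pvS at_ R C dr dc (0+1) _ _))))))))) = true) ↔ _
  rw [pvS]
  simp only [pvInb, pvS, Bool.and_eq_true, Bool.or_eq_true, decide_eq_true_eq, beq_iff_eq,
    bne_iff_ne]
  constructor
  · rintro ⟨⟨hb, hn⟩, h⟩
    rcases h with h | ⟨⟨hb1, he1⟩, ⟨hb1', hn1⟩, h⟩
    · omega
    rcases h with h | ⟨⟨hb2, he2⟩, ⟨hb2', hn2⟩, h⟩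
    · omega
    rcases h with h | ⟨⟨hb3, he3⟩, _⟩
    · omega
    exact ⟨by tauto, hn, by tauto, he1, by tauto, he2, by tauto, he3⟩
  · rintro ⟨hb0, hn0, hb1, he1, hb2, he2, hb3, he3⟩
    refine ⟨⟨by tauto, hn0⟩, Or.inr ⟨⟨by tauto, he1⟩, ⟨by tauto, by rw [he1]; exact hn0⟩,
      Or.inr ⟨⟨by tauto, he2⟩, ⟨by tauto, by rw [he2, he1]; exact hn0⟩,
      Or.inr ⟨⟨by tauto, he3⟩, ⟨by tauto, by rw [he3, he2, he1]; exact hn0⟩, Or.inl trivial⟩⟩⟩⟩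

-- generic form of one of A's four directional sweeps (start cell (r, c), direction (dr, dc))
def pvABlock (board : List (List Int)) (dr dc clo chi rlo rhi : Int)
    (win : PySem.Set (Int × Int)) : PySem.Set (Int × Int) :=
  (PySem.List.pyRange clo chi 1).foldl (fun win c =>
    (PySem.List.pyRange rlo rhi 1).foldl (fun win r =>
      if pvAt board r c = pvAt board (r + dr) (c + dc) ∧
         pvAt board (r + dr) (c + dc) = pvAt board (r + 2 * dr) (c + 2 * dc) ∧
         pvAt board (r + 2 * dr) (c + 2 * dc) = pvAt board (r + 3 * dr) (c + 3 * dc) ∧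
         pvAt board (r + 3 * dr) (c + 3 * dc) ≠ 0 then
        PySem.Set.add (PySem.Set.add win (r, c)) (r + 3 * dr, c + 3 * dc)
      else win) win) win

theorem pvPure_eq_ABlock (board : List (List Int)) (R C dr dc : Int)
    (hdr : dr = 0 ∨ dr = 1 ∨ dr = -1) (hdc : dc = 0 ∨ dc = 1)
    (win : PySem.Set (Int × Int)) :
    pvPure board R C dr dc win =
      pvABlock board dr dc 0 (C - 3 * dc) (max 0 (3 * dr) - 3 * dr)
        (R + min 0 (3 * dr) - 3 * dr) win := by
  unfold pvPure pvABlock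
  have hrhs :
      (PySem.List.pyRange 0 (C - 3 * dc) 1).foldl (fun win c =>
        (PySem.List.pyRange (max 0 (3 * dr) - 3 * dr) (R + min 0 (3 * dr) - 3 * dr) 1).foldl
          (fun win r =>
            if pvAt board r c = pvAt board (r + dr) (c + dc) ∧
               pvAt board (r + dr) (c + dc) = pvAt board (r + 2 * dr) (c + 2 * dc) ∧
               pvAt board (r + 2 * dr) (c + 2 * dc) = pvAt board (r + 3 * dr) (c + 3 * dc) ∧
               pvAt board (r + 3 * dr) (c + 3 * dc) ≠ 0 then
              PySem.Set.add (PySem.Set.add win (r, c)) (r + 3 * dr, c + 3 * dc)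
            else win) win) win =
      (PySem.List.pyRange 0 (C - 3 * dc) 1).foldl (fun win c =>
        (PySem.List.pyRange (max 0 (3 * dr) - 3 * dr) (R + min 0 (3 * dr) - 3 * dr) 1).foldl
          (fun win r =>
            if (decide (pvAt board r c = pvAt board (r + dr) (c + dc) ∧
               pvAt board (r + dr) (c + dc) = pvAt board (r + 2 * dr) (c + 2 * dc) ∧
               pvAt board (r + 2 * dr) (c + 2 * dc) = pvAt board (r + 3 * dr) (c + 3 * dc) ∧
               pvAt board (r + 3 * dr) (c + 3 * dc) ≠ 0)) then
              PySem.Set.add (PySem.Set.add win (r, c)) (r + 3 * dr, c + 3 * dc)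
            else win) win) win := by
    refine pvFoldl_congr2 (fun w c => pvFoldl_congr2 (fun w r => ?_) rfl) rfl
    exact if_congr (decide_eq_true_iff).symm rfl rfl
  rw [hrhs, pvNested_emit, pvNested_emit]
  congr 1
  -- bounds forced on a cell where a window ends
  have hbound : ∀ r c : Int, pvS (pvAt board) R C dr dc 4 r c = true →
      3 * dc ≤ c ∧ c < C ∧ max 0 (3 * dr) ≤ r ∧ r < R + min 0 (3 * dr) := by
    intro r c h
    rw [pvS4_iff] at h
    rcases hdr with h' | h' | h' <;> rcases hdc with h'' | h'' <;> subst h' <;> subst h'' <;>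
      omega
  -- trim the full-grid sweep to the firing region
  rw [pvFlatMap_trim_left _ 0 (3 * dc) C (by rcases hdc with h | h <;> omega)
      (fun x hx1 hx2 => by
        rw [List.flatMap_eq_nil_iff]
        intro r hr
        rw [if_neg]
        intro h
        have := hbound r x h
        omega)]
  have htrimInner : ∀ x, x ∈ PySem.List.pyRange (3 * dc) C 1 →
      (PySem.List.pyRange 0 R 1).flatMap (fun r =>
        if pvS (pvAt board) R C dr dc 4 r x then
          [(r - 3 * dr, x - 3 * dc), (r, x)] else ([] : List (Int × Int))) =
      (PySem.List.pyRange (max 0 (3 * dr)) (R + min 0 (3 * dr)) 1).flatMap (fun r =>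
        if pvS (pvAt board) R C dr dc 4 r x then
          [(r - 3 * dr, x - 3 * dc), (r, x)] else ([] : List (Int × Int))) := by
    intro x _
    rw [pvFlatMap_trim_left _ 0 (max 0 (3 * dr)) R (le_max_left 0 (3 * dr))
        (fun r hr1 hr2 => by
          rw [if_neg]
          intro h
          have := hbound r x h
          omega)]
    rw [pvFlatMap_trim_right _ (max 0 (3 * dr)) (R + min 0 (3 * dr)) R
        (by rcases hdr with h | h | h <;> omega)
        (fun r hr1 hr2 => by
          rw [if_neg]
          intro h
          have := hbound r x h
          omega)]
  rw [pvFlatMap_congr_mem htrimInner]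
  -- shift the start-indexed sweep onto the end-indexed one
  rw [pvFlatMap_shift _ 0 (C - 3 * dc) (3 * dc)]
  rw [show (0 : Int) + 3 * dc = 3 * dc from by ring,
      show C - 3 * dc + 3 * dc = C from by ring]
  refine pvFlatMap_congr_mem fun x hx => ?_
  rw [PySem.List.mem_pyRange_one] at hx
  rw [pvFlatMap_shift _ (max 0 (3 * dr) - 3 * dr) (R + min 0 (3 * dr) - 3 * dr) (3 * dr)]
  rw [show max 0 (3 * dr) - 3 * dr + 3 * dr = max 0 (3 * dr) from by ring,
      show R + min 0 (3 * dr) - 3 * dr + 3 * dr = R + min 0 (3 * dr) from by ring]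
  refine pvFlatMap_congr_mem fun r hr => ?_
  rw [PySem.List.mem_pyRange_one] at hr
  -- pointwise: the window ending at (r, x) is A's window starting at (r - 3dr, x - 3dc)
  simp only [show r - 3 * dr + dr = r - dr - dr from by ring,
    show r - 3 * dr + 2 * dr = r - dr from by ring,
    show r - 3 * dr + 3 * dr = r from by ring,
    show x - 3 * dc + dc = x - dc - dc from by ring,
    show x - 3 * dc + 2 * dc = x - dc from by ring,
    show x - 3 * dc + 3 * dc = x from by ring]
  simp only [show r - 3 * dr = r - dr - dr - dr from by ring,
    show x - 3 * dc = x - dc - dc - dc from by ring]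
  refine if_congr ?_ rfl rfl
  rw [pvS4_iff, decide_eq_true_eq]
  constructor
  · rintro ⟨b0, hn0, b1, he1, b2, he2, b3, he3⟩
    exact ⟨he3, he2, he1, hn0⟩
  · rintro ⟨he3, he2, he1, hn0⟩
    refine ⟨?_, hn0, ?_, he1, ?_, he2, ?_, he3⟩ <;>
      (rcases hdr with h | h | h <;> rcases hdc with h' | h' <;> subst h <;> subst h' <;> omega)

-- ===== VERDICT (by name: the statement is the Claim_ definition above) =====
theorem four_in_line_spec : Claim_equal_four_in_line := by
  intro board _ _
  unfold Spec_four_in_line four_in_line four_in_line_alt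
  simp only [List.foldl_cons, List.foldl_nil]
  rw [pvPass_eq_pure board _ _ 0 1 (Or.inl rfl)]
  rw [pvPass_eq_pure board _ _ 1 0 (Or.inr ⟨rfl, rfl⟩)]
  rw [pvPass_eq_pure board _ _ 1 1 (Or.inl rfl)]
  rw [pvPass_eq_pure board _ _ (-1) 1 (Or.inl rfl)]
  rw [pvPure_eq_ABlock board _ _ 0 1 (Or.inl rfl) (Or.inr rfl)]
  rw [pvPure_eq_ABlock board _ _ 1 0 (Or.inr (Or.inl rfl)) (Or.inl rfl)]
  rw [pvPure_eq_ABlock board _ _ 1 1 (Or.inr (Or.inl rfl)) (Or.inr rfl)]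
  rw [pvPure_eq_ABlock board _ _ (-1) 1 (Or.inr (Or.inr rfl)) (Or.inr rfl)]
  unfold pvABlock
  norm_num
  simp only [← sub_eq_add_neg]
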